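-- pv_equiv track=rewrite | github.com/LingXuanTech/HeavenlyMechanicPavilion | packages/backend/app/services/market_data.py | _extract_primary_csv_lines
-- ===== SOURCE A (Python) =====
-- def _extract_primary_csv_lines(payload: str) -> list[str]:
--     lines = payload.splitlines()
--     csv_lines: list[str] = []
--     header_found = False
--
--     for raw_line in lines:
--         line = raw_line.strip()
--         if not line:
--             if header_found and csv_lines:
--                 break
--             continue
--
--         if line.startswith("#"):
--             if header_found:
--                 break
--             continue
--
--         if not header_found:
--             if line.startswith("Date") or line.startswith("date"):
--                 header_found = True
--                 csv_lines.append(line)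
--             continue
--
--         if header_found and (line.startswith("Date") or line.startswith("date")):
--             break
--
--         csv_lines.append(line)
--
--     return csv_lines
-- ===== SOURCE B (Python) =====
-- def _extract_primary_csv_lines(payload: str) -> list[str]:
--     stripped = (raw.strip() for raw in payload.splitlines())
--     # Phase 1: find the header line.
--     for line in stripped:
--         if line.startswith(("Date", "date")):
--             result = [line]
--             break
--     else:
--         return []
--     # Phase 2: collect data lines until a terminator.
--     for line in stripped:
--         if not line or line.startswith(("#", "Date", "date")):
--             break
--         result.append(line)
--     return result
-- ===== Notes on version B (the rewrite author's own statement) =====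
-- stated objective: simpler
-- what changed: Replaced the single stateful loop with a header_found flag and a conditional break logic by two separate phases over one stripped-line iterator: a find-the-header pass, then a collect-until-terminator pass; the flag disappears.
import Mathlib
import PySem

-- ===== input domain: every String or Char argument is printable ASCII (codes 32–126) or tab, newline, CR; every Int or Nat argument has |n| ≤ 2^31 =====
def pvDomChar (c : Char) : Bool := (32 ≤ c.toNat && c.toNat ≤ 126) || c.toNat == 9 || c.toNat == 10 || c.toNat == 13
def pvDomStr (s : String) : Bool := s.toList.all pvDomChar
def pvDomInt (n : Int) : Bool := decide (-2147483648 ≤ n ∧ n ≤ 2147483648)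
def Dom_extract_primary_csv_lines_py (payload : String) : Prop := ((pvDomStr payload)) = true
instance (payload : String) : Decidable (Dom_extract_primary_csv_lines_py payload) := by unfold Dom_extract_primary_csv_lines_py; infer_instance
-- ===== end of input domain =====

-- B replaces A's single stateful loop (header_found flag) by a find-header pass then a
-- collect-until-terminator pass over the stripped lines: simpler decomposition, same O(n) cost.

-- ===== PORT A =====
-- the for-loop of A, with `break`/`return` as termination of the recursion;
-- state = (csv_lines, header_found), branches in A's order
def pvAGo (lines : List String) (csv : List String) (hf : Bool) : List String :=
  match lines with
  | [] => csv
  | raw :: rest =>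
    let line := PySem.Str.strip raw
    if line = "" then
      if hf && !csv.isEmpty then csv else pvAGo rest csv hf
    else if PySem.Str.startswith line "#" then
      if hf then csv else pvAGo rest csv hf
    else if !hf then
      (if PySem.Str.startswith line "Date" || PySem.Str.startswith line "date" then
        pvAGo rest (csv ++ [line]) true
      else pvAGo rest csv hf)
    else if hf && (PySem.Str.startswith line "Date" || PySem.Str.startswith line "date") then csv
    else pvAGo rest (csv ++ [line]) hf

def extract_primary_csv_lines_py (payload : String) : List String :=
  pvAGo (PySem.Str.splitlines payload) [] false

-- ===== PORT B =====
-- B's phase 2: collect until blank / '#' / header line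
def pvBCollect (lines : List String) (result : List String) : List String :=
  match lines with
  | [] => result
  | l :: rest =>
    if l = "" || PySem.Str.startswith l "#" || PySem.Str.startswith l "Date"
        || PySem.Str.startswith l "date" then result
    else pvBCollect rest (result ++ [l])

-- B's phase 1: find the header, then hand the remaining lines to phase 2
def pvBFind (lines : List String) : List String :=
  match lines with
  | [] => []
  | l :: rest =>
    if PySem.Str.startswith l "Date" || PySem.Str.startswith l "date" then
      pvBCollect rest [l]
    else pvBFind rest

def extract_primary_csv_lines_py_alt (payload : String) : List String :=
  pvBFind ((PySem.Str.splitlines payload).map PySem.Str.strip)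

-- ===== PRECONDITION & SPEC =====
def Spec_extract_primary_csv_lines_py (payload : String) (out : List String) : Prop := out = extract_primary_csv_lines_py_alt payload
instance (payload : String) (out : List String) : Decidable (Spec_extract_primary_csv_lines_py payload out) := by unfold Spec_extract_primary_csv_lines_py; infer_instance

-- ===== CLAIM (what is proved, stated in full; the proofs are below) =====
def Claim_equal_extract_primary_csv_lines_py : Prop := ∀ (payload : String), Dom_extract_primary_csv_lines_py payload → Spec_extract_primary_csv_lines_py payload (extract_primary_csv_lines_py payload)

-- ===== LEMMAS AND PROOFS =====

-- a line starting with '#' does not start with "Date" or "date"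
theorem pvHashNotDate (L : List Char) (h : PySem.Chars.startswith L ['#'] = true) :
    PySem.Chars.startswith L ['D', 'a', 't', 'e'] = false ∧
    PySem.Chars.startswith L ['d', 'a', 't', 'e'] = false := by
  rw [PySem.Chars.startswith_iff] at h
  obtain ⟨t, rfl⟩ := h
  constructor <;>
  · rw [Bool.eq_false_iff]
    intro hc
    rw [PySem.Chars.startswith_iff] at hc
    obtain ⟨u, hu⟩ := hc
    simp at hu

-- once the header is found (hf = true, csv ≠ []), A's loop is B's collect phase
theorem pvAGo_true_eq_collect (lines : List String) (csv : List String) (h : csv ≠ []) :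
    pvAGo lines csv true = pvBCollect (lines.map PySem.Str.strip) csv := by
  induction lines generalizing csv with
  | nil => rfl
  | cons raw rest ih =>
    simp only [pvAGo, pvBCollect, List.map_cons]
    by_cases h0 : PySem.Str.strip raw = ""
    · simp [h0, h]
    · by_cases h1 : PySem.Chars.startswith (PySem.Chars.strip raw.toList) ['#'] = true
      · simp [h0, h1]
      · by_cases hD : PySem.Chars.startswith (PySem.Chars.strip raw.toList) ['D', 'a', 't', 'e'] = true
        · simp [h0, h1, hD]
        · by_cases hd : PySem.Chars.startswith (PySem.Chars.strip raw.toList) ['d', 'a', 't', 'e'] = true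
          · simp [h0, h1, hD, hd]
          · simp [h0, h1, hD, hd, ih]

-- before the header is found (hf = false, csv = []), A's loop is B's find phase
theorem pvAGo_false_eq_find (lines : List String) :
    pvAGo lines [] false = pvBFind (lines.map PySem.Str.strip) := by
  induction lines with
  | nil => rfl
  | cons raw rest ih =>
    simp only [pvAGo, pvBFind, List.map_cons]
    by_cases h0 : PySem.Str.strip raw = ""
    · have hnil : PySem.Chars.strip raw.toList = [] := by
        have := congrArg String.toList h0
        simpa using this
      simp [h0, hnil, ih, PySem.Chars.startswith]
    · by_cases h1 : PySem.Chars.startswith (PySem.Chars.strip raw.toList) ['#'] = true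
      · obtain ⟨hD, hd⟩ := pvHashNotDate _ h1
        simp [h0, h1, hD, hd, ih]
      · by_cases hD : PySem.Chars.startswith (PySem.Chars.strip raw.toList) ['D', 'a', 't', 'e'] = true
        · simp [h0, h1, hD, pvAGo_true_eq_collect]
        · by_cases hd : PySem.Chars.startswith (PySem.Chars.strip raw.toList) ['d', 'a', 't', 'e'] = true
          · simp [h0, h1, hD, hd, pvAGo_true_eq_collect]
          · simp [h0, h1, hD, hd, ih]

-- ===== VERDICT (by name: the statement is the Claim_ definition above) =====
theorem extract_primary_csv_lines_py_spec : Claim_equal_extract_primary_csv_lines_py := by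
  intro payload _
  unfold Spec_extract_primary_csv_lines_py extract_primary_csv_lines_py extract_primary_csv_lines_py_alt
  exact pvAGo_false_eq_find _
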